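-- pv_equiv track=rewrite | github.com/schemathesis/schemathesis | test/pytest/test_main.py | extract_hypothesis_error
-- ===== SOURCE A (Python) =====
-- def extract_hypothesis_error(text):
--     lines = text.split("\n")
--     result_lines = []
--     capturing = False
--
--     for line in lines:
--         if "E   hypothesis" in line:
--             capturing = True
--
--         if capturing:
--             if line.startswith("All traceback"):
--                 break
--             result_lines.append(line)
--
--     return "\n".join(result_lines)
-- ===== SOURCE B (Python) =====
-- def extract_hypothesis_error(text):
--     lines = text.split("\n")
--     start = next((i for i, l in enumerate(lines) if "E   hypothesis" in l), None)
--     if start is None: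
--         return ""
--     end = next((j for j in range(start, len(lines)) if lines[j].startswith("All traceback")), len(lines))
--     return "\n".join(lines[start:end])
-- ===== Notes on version B (the rewrite author's own statement) =====
-- stated objective: simpler
-- what changed: Replaces the stateful capturing-flag loop with explicit index location (first line containing the marker, first terminator line at or after it) followed by a slice and join.
import Mathlib
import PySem

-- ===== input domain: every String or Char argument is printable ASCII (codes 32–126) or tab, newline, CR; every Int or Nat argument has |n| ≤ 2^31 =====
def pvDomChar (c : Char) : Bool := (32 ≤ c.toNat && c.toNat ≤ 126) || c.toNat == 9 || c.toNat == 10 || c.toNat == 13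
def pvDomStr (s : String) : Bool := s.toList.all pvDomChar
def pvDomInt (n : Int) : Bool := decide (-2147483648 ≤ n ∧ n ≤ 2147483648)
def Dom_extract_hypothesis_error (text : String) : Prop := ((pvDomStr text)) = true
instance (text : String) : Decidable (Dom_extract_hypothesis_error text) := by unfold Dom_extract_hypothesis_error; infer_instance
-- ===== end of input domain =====

-- B replaces A's stateful capturing-flag loop by index location plus a slice (objective: simpler decomposition, same cost).

-- ===== PORT A =====
-- the for-loop with its (result_lines, capturing) state and early break
def pvLoopA : List String → List String → Bool → List String
  | [], acc, _ => acc.reverse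
  | l :: rest, acc, cap =>
    let cap := cap || PySem.Str.isIn "E   hypothesis" l
    if cap then
      if PySem.Str.startswith l "All traceback" then acc.reverse
      else pvLoopA rest (l :: acc) true
    else pvLoopA rest acc cap

def extract_hypothesis_error (text : String) : String :=
  -- text.split("\n"): the separator "\n" is nonempty, so split? is always `some`
  let lines := (PySem.Str.split? text "\n").getD []
  PySem.Str.join "\n" (pvLoopA lines [] false)

-- ===== PORT B =====
def extract_hypothesis_error_alt (text : String) : String :=
  -- text.split("\n"): the separator "\n" is nonempty, so split? is always `some`
  let lines := (PySem.Str.split? text "\n").getD []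
  match lines.findIdx? (fun l => PySem.Str.isIn "E   hypothesis" l) with
  | none => ""
  | some start =>
    let rest := lines.drop start
    let stop := start + ((rest.findIdx? (fun l => PySem.Str.startswith l "All traceback")).getD rest.length)
    PySem.Str.join "\n" (PySem.List.slice lines (some (start : Int)) (some (stop : Int)))

-- ===== PRECONDITION & SPEC =====
def Spec_extract_hypothesis_error (text : String) (out : String) : Prop := out = extract_hypothesis_error_alt text
instance (text : String) (out : String) : Decidable (Spec_extract_hypothesis_error text out) := by unfold Spec_extract_hypothesis_error; infer_instance

-- ===== CLAIM (what is proved, stated in full; the proofs are below) =====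
def Claim_equal_extract_hypothesis_error : Prop := ∀ (text : String), Dom_extract_hypothesis_error text → Spec_extract_hypothesis_error text (extract_hypothesis_error text)

-- ===== LEMMAS AND PROOFS =====

-- once capturing, A collects lines until the first "All traceback" line
theorem pvLoopA_true (ls : List String) : ∀ (acc : List String),
    pvLoopA ls acc true
      = acc.reverse ++ ls.takeWhile (fun l => !PySem.Str.startswith l "All traceback") := by
  induction ls with
  | nil => intro acc; simp [pvLoopA]
  | cons l rest ih =>
    intro acc
    by_cases h : PySem.Str.startswith l "All traceback" = true
    all_goals simp at h
    · simp [pvLoopA, h]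
    · simp [pvLoopA, h, ih]

-- first-index search followed by take is takeWhile of the negated test
theorem take_findIdx? {α : Type} (p : α → Bool) (ls : List α) :
    ls.take ((ls.findIdx? p).getD ls.length) = ls.takeWhile (fun l => !(p l)) := by
  induction ls with
  | nil => simp
  | cons l rest ih =>
    by_cases h : p l
    · simp [List.findIdx?_cons, h]
    · cases hf : rest.findIdx? p with
      | none => simp [List.findIdx?_cons, h, hf, ← ih, List.take_succ_cons]
      | some j => simp [List.findIdx?_cons, h, hf, ← ih, List.take_succ_cons]

-- before capturing, A's loop skips lines until the first marker line
theorem pvLoopA_false (ls : List String) :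
    pvLoopA ls [] false
      = match ls.findIdx? (fun l => PySem.Str.isIn "E   hypothesis" l) with
        | none => []
        | some s => (ls.drop s).takeWhile (fun l => !PySem.Str.startswith l "All traceback") := by
  induction ls with
  | nil => simp [pvLoopA]
  | cons l rest ih =>
    by_cases h : PySem.Str.isIn "E   hypothesis" l = true
    · by_cases hs : PySem.Str.startswith l "All traceback" = true
      all_goals simp at h hs
      · simp [pvLoopA, h, hs, List.findIdx?_cons]
      · simp [pvLoopA, h, hs, List.findIdx?_cons, pvLoopA_true]
    · have h' := h
      simp at h'
      cases hf : rest.findIdx? (fun l => PySem.Str.isIn "E   hypothesis" l) with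
      | none =>
        have hrec := ih
        rw [hf] at hrec
        have hf' := hf
        simp at hf'
        have hnone : List.findIdx? (fun (l : String) => PySem.Chars.isIn ['E', ' ', ' ', ' ', 'h', 'y', 'p', 'o', 't', 'h', 'e', 's', 'i', 's'] l.toList) rest = none := by
          rw [List.findIdx?_eq_none_iff]; simpa using hf'
        simp [pvLoopA, h', List.findIdx?_cons, hrec, hnone]
      | some j =>
        have hrec := ih
        rw [hf] at hrec
        have hsome := hf
        simp at hsome
        simp [pvLoopA, h', List.findIdx?_cons, hrec, hsome]

-- ===== VERDICT (by name: the statement is the Claim_ definition above) =====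
theorem extract_hypothesis_error_spec : Claim_equal_extract_hypothesis_error := by
  unfold Claim_equal_extract_hypothesis_error
  intro text _
  unfold Spec_extract_hypothesis_error extract_hypothesis_error extract_hypothesis_error_alt
  simp only
  rw [pvLoopA_false]
  cases hf : ((PySem.Str.split? text "\n").getD []).findIdx? (fun l => PySem.Str.isIn "E   hypothesis" l) with
  | none => simp [PySem.Str.join, PySem.Chars.join, List.intercalate]
  | some s =>
    simp only
    rw [Nat.cast_add, PySem.List.slice_natCast_add, take_findIdx?]
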